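-- pv_equiv track=rewrite | github.com/nuyggnoes/programmers-study | week_4/LV3_디스크컨트롤러.py | solution
-- ===== SOURCE A (Python) =====
-- from heapq import heappush, heappop
--
-- def solution(jobs):
--     n = len(jobs)
--     answer = 0
--     heap = []
--     for j in jobs:
--         heappush(heap, [j[1], j[0]])
--
--     st, end = 0, 0
--     while heap:
--         cur = heappop(heap)
--         st = end
--         end += cur[0]
--         answer += end - cur[1]
--     return answer // n
-- ===== SOURCE B (Python) =====
-- def solution(jobs):
--     n = len(jobs)
--     durs = sorted(j[1] for j in jobs)
--     total = sum((n - i) * d for i, d in enumerate(durs)) - sum(j[0] for j in jobs)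
--     return total // n
-- ===== Notes on version B (the rewrite author's own statement) =====
-- stated objective: simpler
-- what changed: Replaces the heap push/pop loop with mutable st/end accumulators by a sort of the durations plus a closed-form index-weighted sum: answer = (sum((n-i)*d over sorted durations) - sum(starts)) // n.
import Mathlib
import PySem

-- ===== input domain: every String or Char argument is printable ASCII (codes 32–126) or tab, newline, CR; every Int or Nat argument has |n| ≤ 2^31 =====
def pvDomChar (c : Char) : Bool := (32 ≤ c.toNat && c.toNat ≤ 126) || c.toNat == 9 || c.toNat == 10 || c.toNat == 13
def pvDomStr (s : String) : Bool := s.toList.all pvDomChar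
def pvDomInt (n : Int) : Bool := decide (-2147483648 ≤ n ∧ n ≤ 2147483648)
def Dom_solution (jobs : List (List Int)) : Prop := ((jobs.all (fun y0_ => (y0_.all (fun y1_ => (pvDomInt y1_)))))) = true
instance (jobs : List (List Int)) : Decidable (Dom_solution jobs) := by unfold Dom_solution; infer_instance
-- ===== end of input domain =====

-- B replaces A's heap loop with mutable st/end accumulators by a sort of the
-- durations plus a closed-form index-weighted sum (simpler, no priority queue).

-- ===== PORT A =====
-- heapq is ported by its value contract: the heap is the multiset of pushed
-- elements (a list; heappush appends) and heappop removes and returns the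
-- smallest element under Python's list comparison (lexicographic `lexLt`);
-- equal-valued elements are indistinguishable, so the pop VALUE sequence is exact.
def lexLt : List Int → List Int → Bool
  | [], [] => false
  | [], _ :: _ => true
  | _ :: _, [] => false
  | a :: as, b :: bs => a < b || (a == b && lexLt as bs)

-- heappop: select the minimal element, return it with the remaining list
def selectMin (cur : List Int) : List (List Int) → List Int × List (List Int)
  | [] => (cur, [])
  | x :: xs =>
      if lexLt x cur then
        let p := selectMin x xs; (p.1, cur :: p.2)
      else
        let p := selectMin cur xs; (p.1, x :: p.2)

-- needed by solLoop's termination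
theorem selectMin_len (cur : List Int) (xs : List (List Int)) :
    (selectMin cur xs).2.length = xs.length := by
  induction xs generalizing cur with
  | nil => simp [selectMin]
  | cons x xs ih => simp only [selectMin]; split <;> simp [ih]

-- the while loop: cur = heappop(heap); st = end; end += cur[0]; answer += end - cur[1]
def solLoop : List (List Int) → Int → Int → Int → Int
  | [], _, _, ans => ans
  | x :: xs, _st, e, ans =>
      let p := selectMin x xs
      solLoop p.2 e (e + PySem.List.pyGetD p.1 0 0)
        (ans + (e + PySem.List.pyGetD p.1 0 0) - PySem.List.pyGetD p.1 1 0)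
termination_by h => h.length
decreasing_by simp [selectMin_len]

def solution (jobs : List (List Int)) : Int :=
  let n : Int := jobs.length
  let heap := jobs.foldl (fun h j => h ++ [[PySem.List.pyGetD j 1 0, PySem.List.pyGetD j 0 0]]) []
  PySem.Int.floordiv (solLoop heap 0 0 0) n

-- ===== PORT B =====
def solution_alt (jobs : List (List Int)) : Int :=
  let n : Int := jobs.length
  let durs := PySem.List.sorted (jobs.map (fun j => PySem.List.pyGetD j 1 0)) (fun x => x) false
  let total := ((PySem.List.enumerate durs 0).map (fun p => (n - p.1) * p.2)).sum
                 - (jobs.map (fun j => PySem.List.pyGetD j 0 0)).sum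
  PySem.Int.floordiv total n

-- ===== PRECONDITION & SPEC =====
-- Pre_ excludes exactly the inputs where A raises: the empty list (ZeroDivisionError
-- on answer // n) and any job shorter than 2 entries (IndexError on j[1]/j[0]).
def Pre_solution (jobs : List (List Int)) : Prop :=
  jobs ≠ [] ∧ ∀ j ∈ jobs, 2 ≤ j.length
instance (jobs : List (List Int)) : Decidable (Pre_solution jobs) := by unfold Pre_solution; infer_instance

def pvWitness_solution : List (List Int) := [[0, 3], [1, 9], [2, 6]]

def Spec_solution (jobs : List (List Int)) (out : Int) : Prop := out = solution_alt jobs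
instance (jobs : List (List Int)) (out : Int) : Decidable (Spec_solution jobs out) := by unfold Spec_solution; infer_instance

-- ===== CLAIM (what is proved, stated in full; the proofs are below) =====
def Claim_equal_solution : Prop := ∀ (jobs : List (List Int)), Dom_solution jobs → Pre_solution jobs → Spec_solution jobs (solution jobs)

-- ===== LEMMAS AND PROOFS =====

def durOf (x : List Int) : Int := PySem.List.pyGetD x 0 0
def stOf (x : List Int) : Int := PySem.List.pyGetD x 1 0

-- the sequence of values heappop yields
def popAll : List (List Int) → List (List Int)
  | [] => []
  | x :: xs => let p := selectMin x xs; p.1 :: popAll p.2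
termination_by h => h.length
decreasing_by simp [selectMin_len]

-- A's loop body as a fold over the pop sequence
def gAcc : Int → List (List Int) → Int
  | _, [] => 0
  | e, x :: t => (e + durOf x) - stOf x + gAcc (e + durOf x) t

-- prefix-sum accumulator over durations
def prefW : Int → List Int → Int
  | _, [] => 0
  | e, d :: t => (e + d) + prefW (e + d) t

theorem selectMin_perm (cur : List Int) (xs : List (List Int)) :
    ((selectMin cur xs).1 :: (selectMin cur xs).2).Perm (cur :: xs) := by
  induction xs generalizing cur with
  | nil => simp [selectMin]
  | cons x xs ih =>
      simp only [selectMin]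
      split
      · exact (List.Perm.swap cur (selectMin x xs).1 (selectMin x xs).2).trans
          ((ih x).cons cur)
      · exact ((List.Perm.swap x (selectMin cur xs).1 (selectMin cur xs).2).trans
          ((ih cur).cons x)).trans (List.Perm.swap cur x xs)

theorem lexLt_head_le {a b : Int} {as bs : List Int} (h : lexLt (a :: as) (b :: bs) = true) :
    a ≤ b := by
  simp only [lexLt, Bool.or_eq_true, Bool.and_eq_true, decide_eq_true_eq, beq_iff_eq] at h
  rcases h with h | ⟨h, _⟩ <;> omega

theorem lexLt_head_ge {a b : Int} {as bs : List Int} (h : lexLt (a :: as) (b :: bs) = false) :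
    b ≤ a := by
  simp only [lexLt, Bool.or_eq_false_iff, decide_eq_false_iff_not] at h
  omega

theorem durOf_le_of_lexLt {x y : List Int} (hx : x ≠ []) (hy : y ≠ [])
    (h : lexLt x y = true) : durOf x ≤ durOf y := by
  cases x with
  | nil => exact absurd rfl hx
  | cons a as => cases y with
    | nil => exact absurd rfl hy
    | cons b bs => simpa [durOf, PySem.List.pyGetD_zero_cons] using lexLt_head_le h

theorem durOf_le_of_not_lexLt {x y : List Int} (hx : x ≠ []) (hy : y ≠ [])
    (h : lexLt x y = false) : durOf y ≤ durOf x := by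
  cases x with
  | nil => exact absurd rfl hx
  | cons a as => cases y with
    | nil => exact absurd rfl hy
    | cons b bs => simpa [durOf, PySem.List.pyGetD_zero_cons] using lexLt_head_ge h

theorem selectMin_min (xs : List (List Int)) : ∀ (cur : List Int),
    (∀ y ∈ cur :: xs, y ≠ []) →
    ∀ y ∈ cur :: xs, durOf (selectMin cur xs).1 ≤ durOf y := by
  induction xs with
  | nil =>
      intro cur hne y hy
      rcases List.mem_cons.mp hy with rfl | h
      · simp [selectMin]
      · simp at h
  | cons x xs ih =>
      intro cur hne y hy
      have hcur : cur ≠ [] := hne cur (by simp)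
      have hx : x ≠ [] := hne x (by simp)
      have hne' : ∀ z ∈ x :: xs, z ≠ [] := by
        intro z hz
        apply hne
        rcases List.mem_cons.mp hz with rfl | h
        · simp
        · simp [h]
      have hnec : ∀ z ∈ cur :: xs, z ≠ [] := by
        intro z hz
        apply hne
        rcases List.mem_cons.mp hz with rfl | h
        · simp
        · simp [h]
      simp only [selectMin]
      split
      · rename_i hlt
        rcases List.mem_cons.mp hy with rfl | hy2
        · exact le_trans (ih x hne' x (by simp)) (durOf_le_of_lexLt hx hcur hlt)
        · exact ih x hne' y hy2
      · rename_i hlt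
        have hltf : lexLt x cur = false := by simpa using hlt
        rcases List.mem_cons.mp hy with rfl | hy2
        · exact ih _ hnec _ (by simp)
        · rcases List.mem_cons.mp hy2 with rfl | hy3
          · exact le_trans (ih cur hnec cur (by simp))
              (durOf_le_of_not_lexLt hx hcur hltf)
          · exact ih cur hnec y (List.mem_cons_of_mem _ hy3)

theorem popAll_perm_aux : ∀ (n : Nat) (h : List (List Int)), h.length ≤ n →
    (popAll h).Perm h := by
  intro n
  induction n with
  | zero =>
      intro h hl
      cases h with
      | nil => simp [popAll]
      | cons x xs => simp at hl
  | succ n ihn =>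
      intro h hl
      cases h with
      | nil => simp [popAll]
      | cons x xs =>
          simp only [popAll]
          have hlen : (selectMin x xs).2.length ≤ n := by
            rw [selectMin_len]; simpa using hl
          exact ((ihn _ hlen).cons _).trans (selectMin_perm x xs)

theorem popAll_perm (h : List (List Int)) : (popAll h).Perm h :=
  popAll_perm_aux h.length h le_rfl

theorem popAll_pairwise_aux : ∀ (n : Nat) (h : List (List Int)), h.length ≤ n →
    (∀ x ∈ h, x ≠ []) → (popAll h).Pairwise (fun a b => durOf a ≤ durOf b) := by
  intro n
  induction n with
  | zero =>
      intro h hl _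
      cases h with
      | nil => simp [popAll]
      | cons x xs => simp at hl
  | succ n ihn =>
      intro h hl hne
      cases h with
      | nil => simp [popAll]
      | cons x xs =>
          have hsub : ∀ y ∈ (selectMin x xs).2, y ∈ x :: xs := fun y hy =>
            (selectMin_perm x xs).subset (List.mem_cons_of_mem _ hy)
          have hne2 : ∀ y ∈ (selectMin x xs).2, y ≠ [] := fun y hy => hne y (hsub y hy)
          have hlen : (selectMin x xs).2.length ≤ n := by
            rw [selectMin_len]; simpa using hl
          simp only [popAll]
          refine List.Pairwise.cons ?_ (ihn _ hlen hne2)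
          intro y hy
          exact selectMin_min xs x hne y (hsub y ((popAll_perm (selectMin x xs).2).subset hy))

theorem popAll_pairwise (h : List (List Int)) (hne : ∀ x ∈ h, x ≠ []) :
    (popAll h).Pairwise (fun a b => durOf a ≤ durOf b) :=
  popAll_pairwise_aux h.length h le_rfl hne

theorem solLoop_eq_aux : ∀ (n : Nat) (h : List (List Int)), h.length ≤ n →
    ∀ (st e a : Int), solLoop h st e a = a + gAcc e (popAll h) := by
  intro n
  induction n with
  | zero =>
      intro h hl st e a
      cases h with
      | nil => simp [solLoop, popAll, gAcc]
      | cons x xs => simp at hl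
  | succ n ihn =>
      intro h hl st e a
      cases h with
      | nil => simp [solLoop, popAll, gAcc]
      | cons x xs =>
          have hlen : (selectMin x xs).2.length ≤ n := by
            rw [selectMin_len]; simpa using hl
          simp only [solLoop, popAll, gAcc, durOf, stOf]
          rw [ihn _ hlen]
          ring

theorem solLoop_eq (h : List (List Int)) (st e a : Int) :
    solLoop h st e a = a + gAcc e (popAll h) :=
  solLoop_eq_aux h.length h le_rfl st e a

theorem gAcc_split (l : List (List Int)) : ∀ e : Int,
    gAcc e l = prefW e (l.map durOf) - (l.map stOf).sum := by
  induction l with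
  | nil => intro e; simp [gAcc, prefW]
  | cons x t ih => intro e; simp only [gAcc, prefW, List.map_cons, List.sum_cons, ih]; ring

theorem prefW_enum (ds : List Int) : ∀ (e k n : Int), n = k + ds.length →
    prefW e ds = ((PySem.List.enumerate ds k).map (fun p => (n - p.1) * p.2)).sum
      + e * ds.length := by
  induction ds with
  | nil => intro e k n _; simp [prefW, PySem.List.enumerate]
  | cons d t ih =>
      intro e k n hn
      have hn2 : n = k + (t.length : Int) + 1 := by
        simp only [List.length_cons] at hn; push_cast at hn; omega
      subst hn2
      rw [prefW, PySem.List.enumerate_cons, List.map_cons, List.sum_cons,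
        ih (e + d) (k + 1) (k + (t.length : Int) + 1) (by ring)]
      simp only [List.length_cons]
      push_cast
      ring

theorem foldl_push_eq_map (jobs : List (List Int)) :
    jobs.foldl (fun h j => h ++ [[PySem.List.pyGetD j 1 0, PySem.List.pyGetD j 0 0]]) []
      = jobs.map (fun j => [PySem.List.pyGetD j 1 0, PySem.List.pyGetD j 0 0]) := by
  simpa using PySem.List.foldl_append_singleton_eq_map
    (fun j => [PySem.List.pyGetD j 1 0, PySem.List.pyGetD j 0 0]) jobs []


-- ===== VERDICT (by name: the statement is the Claim_ definition above) =====
theorem solution_spec : Claim_equal_solution := by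
  intro jobs _dom _pre
  unfold Spec_solution solution solution_alt
  simp only [foldl_push_eq_map]
  set f : List Int → List Int := fun j => [PySem.List.pyGetD j 1 0, PySem.List.pyGetD j 0 0] with hf
  set heap := jobs.map f with hheap
  have hne : ∀ x ∈ heap, x ≠ [] := by
    intro x hx
    rw [hheap] at hx
    obtain ⟨j, _, rfl⟩ := List.mem_map.mp hx
    simp [hf]
  have hdur : heap.map durOf = jobs.map (fun j => PySem.List.pyGetD j 1 0) := by
    rw [hheap, List.map_map]; rfl
  have hst : heap.map stOf = jobs.map (fun j => PySem.List.pyGetD j 0 0) := by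
    rw [hheap, List.map_map]; rfl
  have hperm : ((popAll heap).map durOf).Perm (jobs.map (fun j => PySem.List.pyGetD j 1 0)) := by
    rw [← hdur]; exact (popAll_perm heap).map durOf
  have hpw : ((popAll heap).map durOf).Pairwise (· ≤ ·) := by
    rw [List.pairwise_map]; exact popAll_pairwise heap hne
  have hsorted : PySem.List.sorted (jobs.map (fun j => PySem.List.pyGetD j 1 0)) (fun x => x) false
      = (popAll heap).map durOf :=
    PySem.List.sorted_id_eq_of_perm_of_pairwise _ _ hperm hpw
  have hlen : (((popAll heap).map durOf).length : Int) = (jobs.length : Int) := by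
    rw [List.length_map, (popAll_perm heap).length_eq, hheap, List.length_map]
  have hstsum : ((popAll heap).map stOf).sum
      = (jobs.map (fun j => PySem.List.pyGetD j 0 0)).sum := by
    rw [← hst]; exact ((popAll_perm heap).map stOf).sum_eq
  rw [solLoop_eq, gAcc_split, hsorted,
    prefW_enum ((popAll heap).map durOf) 0 0 (jobs.length : Int) (by rw [hlen]; ring), hstsum]
  congr 1
  ring
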